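-- pv_equiv track=rewrite | github.com/MGI-tech-bioinformatics/SARS-CoV-2_Multi-PCR_v1.0 | bin/etiology/generate_rem_report.py | setWarpTitle
-- ===== SOURCE A (Python) =====
-- def setWarpTitle(title):
--     titleName = ""
--     if "/" in title:
--         titleName = title.split("/")[0] + "<br>"
--         for name in title.split("/")[1:]:
--             titleName += "/" + name + "<br>"
--     elif "_" in title:
--         for name in title.split("_"):
--             titleName += name + "<br>"
--     else:
--         titleName = title
--     return titleName
-- ===== SOURCE B (Python) =====
-- def setWarpTitle(title):
--     if "/" in title:
--         return title.replace("/", "<br>/") + "<br>"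
--     if "_" in title:
--         return title.replace("_", "<br>") + "<br>"
--     return title
-- ===== Notes on version B (the rewrite author's own statement) =====
-- stated objective: simpler
-- what changed: Replaced the split-then-accumulate loops with closed-form str.replace substitutions ("/" -> "<br>/", "_" -> "<br>") plus a trailing "<br>".
import Mathlib
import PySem

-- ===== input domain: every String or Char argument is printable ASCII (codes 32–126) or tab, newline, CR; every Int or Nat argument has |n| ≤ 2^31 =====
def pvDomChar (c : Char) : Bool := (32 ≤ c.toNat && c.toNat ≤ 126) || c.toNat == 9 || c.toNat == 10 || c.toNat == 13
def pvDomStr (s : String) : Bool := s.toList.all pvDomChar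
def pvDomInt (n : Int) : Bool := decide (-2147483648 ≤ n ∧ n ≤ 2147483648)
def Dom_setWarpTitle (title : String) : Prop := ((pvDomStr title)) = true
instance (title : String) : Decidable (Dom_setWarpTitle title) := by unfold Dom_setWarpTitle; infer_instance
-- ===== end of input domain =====

-- B replaces A's split-then-accumulate loops with closed-form string substitutions; objective: simpler.

-- ===== PORT A =====
-- Literal transliteration of A on the character-list level (PySem.Str functions are
-- themselves thin wrappers over PySem.Chars on toList).
-- 'title.split(sep)[0]' is headD [] (Python's split never returns an empty list);
-- 'title.split(sep)[1:]' is drop 1; each '+=' accumulation is a foldl over the same state.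
def setWarpTitleChars (title : List Char) : List Char :=
  if PySem.Chars.isIn "/".toList title then
    let parts := PySem.Chars.splitOn title "/".toList
    let titleName := parts.headD [] ++ "<br>".toList
    (parts.drop 1).foldl (fun acc name => acc ++ "/".toList ++ name ++ "<br>".toList) titleName
  else if PySem.Chars.isIn "_".toList title then
    (PySem.Chars.splitOn title "_".toList).foldl
      (fun acc name => acc ++ name ++ "<br>".toList) []
  else title

def setWarpTitle (title : String) : String :=
  String.ofList (setWarpTitleChars title.toList)

-- ===== PORT B =====
-- Literal transliteration of B: branch on membership, then a single replace plus "<br>".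
def setWarpTitle_alt (title : String) : String :=
  if PySem.Str.isIn "/" title then
    String.ofList (PySem.Chars.replace title.toList "/".toList "<br>/".toList ++ "<br>".toList)
  else if PySem.Str.isIn "_" title then
    String.ofList (PySem.Chars.replace title.toList "_".toList "<br>".toList ++ "<br>".toList)
  else title

-- ===== PRECONDITION & SPEC =====
def Spec_setWarpTitle (title : String) (out : String) : Prop := out = setWarpTitle_alt title
instance (title : String) (out : String) : Decidable (Spec_setWarpTitle title out) := by unfold Spec_setWarpTitle; infer_instance

-- ===== CLAIM (what is proved, stated in full; the proofs are below) =====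
def Claim_equal_setWarpTitle : Prop := ∀ (title : String), Dom_setWarpTitle title → Spec_setWarpTitle title (setWarpTitle title)

-- ===== LEMMAS AND PROOFS =====

-- Proof-side join: parts interleaved with `new` (replace = pvJoin new ∘ splitOn).
def pvJoin (new : List Char) : List (List Char) → List Char
  | [] => []
  | [p] => p
  | p :: q :: ps => p ++ new ++ pvJoin new (q :: ps)

theorem pvJoin_cons_cons (new p q : List Char) (ps : List (List Char)) :
    pvJoin new (p :: q :: ps) = p ++ new ++ pvJoin new (q :: ps) := rfl

-- splitOn.go's part-list accumulator factors out.
theorem splitOn_go_acc (sep : List Char) (fuel : Nat) (l cur : List Char)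
    (acc : List (List Char)) :
    PySem.Chars.splitOn.go sep fuel l cur acc
      = acc.reverse ++ PySem.Chars.splitOn.go sep fuel l cur [] := by
  induction fuel generalizing l cur acc with
  | zero => simp [PySem.Chars.splitOn.go]
  | succ n ih =>
    cases l with
    | nil => simp [PySem.Chars.splitOn.go]
    | cons c t =>
      simp only [PySem.Chars.splitOn.go]
      split
      · rw [ih _ _ (cur.reverse :: acc), ih _ _ [cur.reverse]]
        simp
      · exact ih _ _ _

-- splitOn.go never returns an empty part list.
theorem splitOn_go_ne_nil (sep : List Char) (fuel : Nat) (l cur : List Char)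
    (acc : List (List Char)) :
    PySem.Chars.splitOn.go sep fuel l cur acc ≠ [] := by
  induction fuel generalizing l cur acc with
  | zero => simp [PySem.Chars.splitOn.go]
  | succ n ih =>
    cases l with
    | nil => simp [PySem.Chars.splitOn.go]
    | cons c t =>
      simp only [PySem.Chars.splitOn.go]
      split
      · exact ih _ _ _
      · exact ih _ _ _

-- The current-chunk accumulator only prefixes the first part.
theorem splitOn_go_cur (sep : List Char) (fuel : Nat) (l cur : List Char) :
    PySem.Chars.splitOn.go sep fuel l cur []
      = (cur.reverse ++ (PySem.Chars.splitOn.go sep fuel l [] []).headD [])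
        :: (PySem.Chars.splitOn.go sep fuel l [] []).tail := by
  induction fuel generalizing l cur with
  | zero => simp [PySem.Chars.splitOn.go]
  | succ n ih =>
    cases l with
    | nil => simp [PySem.Chars.splitOn.go]
    | cons c t =>
      simp only [PySem.Chars.splitOn.go, List.reverse_nil]
      split
      · rw [splitOn_go_acc _ _ _ _ [cur.reverse], splitOn_go_acc _ _ _ _ [[]]]
        simp
      · rw [ih t (c :: cur), ih t [c]]
        simp

-- Core bridge: replace scans exactly as splitOn does, so replace = pvJoin new ∘ splitOn
-- (fuel-independent as soon as the fuel covers the remaining input).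
theorem replace_go_eq_join (old new : List Char) (hold : old ≠ [])
    (fuelR fuelS : Nat) (l acc : List Char)
    (hR : l.length ≤ fuelR) (hS : l.length ≤ fuelS) :
    PySem.Chars.replace.go old new fuelR l acc
      = acc.reverse ++ pvJoin new (PySem.Chars.splitOn.go old fuelS l [] []) := by
  induction fuelR generalizing fuelS l acc with
  | zero =>
    have : l = [] := List.eq_nil_of_length_eq_zero (Nat.le_zero.mp hR)
    subst this
    cases fuelS with
    | zero => simp [PySem.Chars.replace.go, PySem.Chars.splitOn.go, pvJoin]
    | succ m => simp [PySem.Chars.replace.go, PySem.Chars.splitOn.go, pvJoin]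
  | succ n ih =>
    cases l with
    | nil =>
      cases fuelS with
      | zero => simp [PySem.Chars.replace.go, PySem.Chars.splitOn.go, pvJoin]
      | succ m => simp [PySem.Chars.replace.go, PySem.Chars.splitOn.go, pvJoin]
    | cons c t =>
      cases fuelS with
      | zero => simp at hS
      | succ m =>
        simp only [PySem.Chars.replace.go, PySem.Chars.splitOn.go, List.reverse_nil]
        have hlen : 1 ≤ old.length := by
          cases old with
          | nil => exact absurd rfl hold
          | cons _ _ => simp
        have hR' : t.length + 1 ≤ n + 1 := by simpa using hR
        have hS' : t.length + 1 ≤ m + 1 := by simpa using hS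
        have hd : (List.drop old.length (c :: t)).length = t.length + 1 - old.length := by
          simp
        split
        · -- sep/old is a prefix: both drop old.length characters
          have hdropR : (List.drop old.length (c :: t)).length ≤ n := by
            rw [hd]; omega
          have hdropS : (List.drop old.length (c :: t)).length ≤ m := by
            rw [hd]; omega
          rw [ih m _ _ hdropR hdropS,
              splitOn_go_acc _ _ _ _ [[]]]
          rcases h0 : PySem.Chars.splitOn.go old m (List.drop old.length (c :: t)) [] [] with _ | ⟨p, ps⟩
          · exact absurd h0 (splitOn_go_ne_nil _ _ _ _ _)
          · simp [pvJoin_cons_cons]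
        · -- no match: consume one character on both sides
          have htR : t.length ≤ n := by omega
          have htS : t.length ≤ m := by omega
          rw [ih m _ _ htR htS, splitOn_go_cur old m t [c]]
          rcases h0 : PySem.Chars.splitOn.go old m t [] [] with _ | ⟨p, ps⟩
          · exact absurd h0 (splitOn_go_ne_nil _ _ _ _ _)
          · cases ps with
            | nil => simp [pvJoin]
            | cons q qs => simp [pvJoin_cons_cons]

theorem replace_eq_join (l old new : List Char) (hold : old ≠ []) :
    PySem.Chars.replace l old new = pvJoin new (PySem.Chars.splitOn l old) := by
  unfold PySem.Chars.replace PySem.Chars.splitOn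
  rw [if_neg (by simpa [List.isEmpty_iff] using hold)]
  simpa using replace_go_eq_join old new hold l.length (l.length + 1) l []
    (le_refl _) (Nat.le_succ _)

-- A's "/"-loop over the tail equals pvJoin (new = "<br>/") plus the trailing "<br>".
theorem slash_fold_eq_join (br sl : List Char) (p0 : List Char) (ps : List (List Char)) :
    ps.foldl (fun acc name => acc ++ sl ++ name ++ br) (p0 ++ br)
      = pvJoin (br ++ sl) (p0 :: ps) ++ br := by
  induction ps generalizing p0 with
  | nil => simp [pvJoin]
  | cons q qs ih =>
    simp only [List.foldl_cons, pvJoin_cons_cons]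
    have : p0 ++ br ++ sl ++ q ++ br = (p0 ++ br ++ sl ++ q) ++ br := by simp
    rw [this, ih (p0 ++ br ++ sl ++ q)]
    cases qs with
    | nil => simp [pvJoin]
    | cons r rs => simp [pvJoin_cons_cons]

-- A's "_"-loop equals pvJoin (new = "<br>") plus the trailing "<br>".
theorem under_fold_eq_join (br : List Char) (p0 : List Char) (ps : List (List Char)) :
    ps.foldl (fun acc name => acc ++ name ++ br) (p0 ++ br)
      = pvJoin br (p0 :: ps) ++ br := by
  induction ps generalizing p0 with
  | nil => simp [pvJoin]
  | cons q qs ih =>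
    simp only [List.foldl_cons, pvJoin_cons_cons]
    have : p0 ++ br ++ q ++ br = (p0 ++ br ++ q) ++ br := by simp
    rw [this, ih (p0 ++ br ++ q)]
    cases qs with
    | nil => simp [pvJoin]
    | cons r rs => simp [pvJoin_cons_cons]

theorem setWarpTitleChars_eq (l : List Char) :
    setWarpTitleChars l
      = if PySem.Chars.isIn "/".toList l then
          PySem.Chars.replace l "/".toList "<br>/".toList ++ "<br>".toList
        else if PySem.Chars.isIn "_".toList l then
          PySem.Chars.replace l "_".toList "<br>".toList ++ "<br>".toList
        else l := by
  unfold setWarpTitleChars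
  split
  · rcases h0 : PySem.Chars.splitOn l "/".toList with _ | ⟨p, ps⟩
    · exact absurd h0 (splitOn_go_ne_nil _ _ _ _ _)
    · rw [replace_eq_join l "/".toList "<br>/".toList (by decide), h0]
      have : "<br>/".toList = "<br>".toList ++ "/".toList := by decide
      rw [this]
      simpa using slash_fold_eq_join "<br>".toList "/".toList p ps
  · split
    · rcases h0 : PySem.Chars.splitOn l "_".toList with _ | ⟨p, ps⟩
      · exact absurd h0 (splitOn_go_ne_nil _ _ _ _ _)
      · rw [replace_eq_join l "_".toList "<br>".toList (by decide), h0]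
        simpa using under_fold_eq_join "<br>".toList p ps
    · rfl

-- ===== VERDICT (by name: the statement is the Claim_ definition above) =====
theorem setWarpTitle_spec : Claim_equal_setWarpTitle := by
  intro title _
  unfold Spec_setWarpTitle setWarpTitle setWarpTitle_alt
  rw [setWarpTitleChars_eq]
  simp only [PySem.Str.isIn]
  split
  · rfl
  · split
    · rfl
    · simp [String.ofList]
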